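-- pv_equiv track=rewrite | github.com/Storm1seven/Competitive-Programming | Codeforces/1341/c/c.py | check
-- ===== SOURCE A (Python) =====
-- def check(a, start):
--     count = 0
--     for i in a[::-1]:
--         if i == start+count:
--             count+=1
--         else:
--             return False
--     return True
-- ===== SOURCE B (Python) =====
-- def check(a, start):
--     if not a:
--         return True
--     if a[-1] != start:
--         return False
--     return all(x - y == 1 for x, y in zip(a, a[1:]))
-- ===== Notes on version B (the rewrite author's own statement) =====
-- stated objective: alternative
-- what changed: B replaces A's walk over the reversed list with a counter by a local characterization: the last element must equal start and every adjacent pair must descend by exactly 1, checked with zip over the list and its tail (no reversal, no counter, no constructed sequence).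
import Mathlib
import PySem

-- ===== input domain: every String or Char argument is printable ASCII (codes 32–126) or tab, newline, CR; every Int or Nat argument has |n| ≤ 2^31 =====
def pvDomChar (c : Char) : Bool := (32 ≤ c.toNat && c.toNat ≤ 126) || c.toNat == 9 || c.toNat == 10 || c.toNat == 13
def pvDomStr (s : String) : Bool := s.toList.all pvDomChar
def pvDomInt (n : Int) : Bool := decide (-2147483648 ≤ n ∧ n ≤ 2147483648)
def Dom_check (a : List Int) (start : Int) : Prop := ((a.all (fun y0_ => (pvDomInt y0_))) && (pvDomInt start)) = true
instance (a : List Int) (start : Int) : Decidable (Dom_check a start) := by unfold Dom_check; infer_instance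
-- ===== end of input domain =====

-- B replaces A's counter-loop over the reversed list by a local characterization — last element
-- equals start and every adjacent pair descends by exactly 1 (objective: alternative).

-- ===== PORT A =====
-- the for-loop over a[::-1] with early `return False`; loop state = count
def checkLoop (start : Int) : List Int → Int → Bool
  | [], _ => true
  | i :: rest, count => if i == start + count then checkLoop start rest (count + 1) else false

def check (a : List Int) (start : Int) : Bool :=
  checkLoop start ((PySem.List.slice? a none none (-1)).getD []) 0   -- a[::-1]; step = -1 ≠ 0 so never none

-- ===== PORT B =====
-- if not a: return True
-- if a[-1] != start: return False
-- return all(x - y == 1 for x, y in zip(a, a[1:]))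
def check_alt (a : List Int) (start : Int) : Bool :=
  if a.isEmpty then true
  else if (PySem.List.pyGet? a (-1)).getD 0 != start then false
  else (a.zip (PySem.List.slice a (some 1) none)).all (fun p => p.1 - p.2 == 1)

-- ===== PRECONDITION & SPEC =====
def Spec_check (a : List Int) (start : Int) (out : Bool) : Prop := out = check_alt a start
instance (a : List Int) (start : Int) (out : Bool) : Decidable (Spec_check a start out) := by unfold Spec_check; infer_instance

-- ===== CLAIM =====
def Claim_equal_check : Prop := ∀ (a : List Int) (start : Int), Dom_check a start → Spec_check a start (check a start)

-- ===== LEMMAS AND PROOFS =====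

-- the descending run [start+n-1, …, start+1, start]
def pvRun (start : Int) : Nat → List Int
  | 0 => []
  | n + 1 => (start + n) :: pvRun start n

theorem pvRun_reverse (start : Int) (n : Nat) :
    (pvRun start n).reverse = (PySem.List.pyRange 0 (n : Int) 1).map (fun i => start + i) := by
  induction n with
  | zero => simp [pvRun]
  | succ m ih =>
    have h : (0 : Int) ≤ (m : Int) := by positivity
    have : ((m + 1 : Nat) : Int) = (m : Int) + 1 := by push_cast; ring
    rw [pvRun, List.reverse_cons, ih, this, PySem.List.pyRange_one_succ_right h, List.map_append]
    simp

-- A's loop over xs with counter starting at c succeeds iff xs equals start+c, start+c+1, …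
theorem checkLoop_eq (start : Int) (xs : List Int) (c : Int) :
    checkLoop start xs c
      = (xs == (PySem.List.pyRange c (c + xs.length) 1).map (fun i => start + i)) := by
  induction xs generalizing c with
  | nil => simp [checkLoop]
  | cons i rest ih =>
    have hlt : c < c + ((i :: rest).length : Int) := by
      simp only [List.length_cons]; push_cast; omega
    rw [PySem.List.pyRange_one_cons hlt, List.map_cons]
    simp only [checkLoop, List.length_cons]
    have harg : c + ((rest.length + 1 : Nat) : Int) = c + 1 + (rest.length : Int) := by
      push_cast; ring
    rw [harg, List.cons_beq_cons, ih]
    by_cases h : i = start + c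
    · simp [h]
    · simp [h]

-- A's characterization: the list is the descending run of its length ending at start
theorem check_eq_run (a : List Int) (start : Int) :
    check a start = (a == pvRun start a.length) := by
  unfold check
  rw [PySem.List.slice?_none_none_neg_one]
  simp only [Option.getD_some]
  rw [checkLoop_eq]
  simp only [List.length_reverse, zero_add]
  rw [← pvRun_reverse]
  rw [Bool.eq_iff_iff]
  simp only [beq_iff_eq]
  exact ⟨fun hc => List.reverse_injective hc, fun hc => congrArg List.reverse hc⟩

-- step law for B on lists of length ≥ 2
theorem check_alt_cons_cons (x y : Int) (xs : List Int) (start : Int) :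
    check_alt (x :: y :: xs) start = ((x - y == 1) && check_alt (y :: xs) start) := by
  unfold check_alt
  rw [PySem.List.slice_from_one, PySem.List.slice_from_one]
  simp only [List.isEmpty_cons, List.tail_cons, List.zip_cons_cons, List.all_cons,
    Bool.if_false_left]
  have hlast : PySem.List.pyGet? (x :: y :: xs) (-1) = PySem.List.pyGet? (y :: xs) (-1) := by
    rw [PySem.List.pyGet?_neg_one, PySem.List.pyGet?_neg_one]
    simp [List.getLast?]
  rw [hlast]
  by_cases h : (PySem.List.pyGet? (y :: xs) (-1)).getD 0 = start
  · simp [h]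
  · simp [h]

-- B's characterization: the same descending run
theorem check_alt_eq_run (a : List Int) (start : Int) :
    check_alt a start = (a == pvRun start a.length) := by
  induction a with
  | nil => simp [check_alt, pvRun]
  | cons x xs ih =>
    cases xs with
    | nil =>
      unfold check_alt
      rw [PySem.List.slice_from_one]
      simp only [List.isEmpty_cons, List.tail_cons, List.zip_nil_right, List.all_nil,
        Bool.if_false_left, PySem.List.pyGet?_neg_one]
      simp only [List.getLast?_singleton, Option.getD_some, List.length_cons,
        List.length_nil, pvRun]
      have : start + ((0 : Nat) : Int) = start := by push_cast; ring
      rw [this]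
      by_cases h : x = start
      · simp [h]
      · simp [h]
    | cons y ys =>
      rw [check_alt_cons_cons, ih]
      simp only [List.length_cons, pvRun, List.cons_beq_cons]
      have hcast : ((ys.length + 1 : Nat) : Int) = (ys.length : Int) + 1 := by push_cast; ring
      by_cases hyy : y = start + (ys.length : Int)
      · by_cases hys : ys = pvRun start ys.length
        · rw [show (ys == pvRun start ys.length) = true from beq_iff_eq.mpr hys,
              show (y == start + (ys.length : Int)) = true from beq_iff_eq.mpr hyy]
          simp only [Bool.and_true]
          rw [hcast, hyy, Bool.eq_iff_iff]
          have h2 : (x - (start + (ys.length : Int)) = 1) ↔ (x = start + ((ys.length : Int) + 1)) := by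
            omega
          simp only [beq_iff_eq, h2]
        · rw [beq_eq_false_iff_ne.mpr hys]
          simp
      · rw [beq_eq_false_iff_ne.mpr hyy]
        simp

-- ===== VERDICT =====
theorem check_spec : Claim_equal_check := by
  intro a start _
  unfold Spec_check
  rw [check_eq_run, check_alt_eq_run]
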